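-- pv_equiv track=rewrite | github.com/niangea/python-script | get_dir_size.py | get_file_length
-- ===== SOURCE A (Python) =====
-- def get_file_length(file_name):
--   characters = list(file_name)
--   ascii_length = 0
--   utf8_length = 0
--
--   for character in characters:
--     if ord(character) < 128:
--       ascii_length += 1
--     else:
--       utf8_length += 2
--
--   return ascii_length + utf8_length
-- ===== SOURCE B (Python) =====
-- def get_file_length(file_name):
--   def weight(lo, hi):
--     if hi - lo == 0:
--       return 0
--     if hi - lo == 1:
--       return 1 if ord(file_name[lo]) < 128 else 2
--     mid = (lo + hi) // 2
--     return weight(lo, mid) + weight(mid, hi)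
--   return weight(0, len(file_name))
-- ===== Notes on version B (the rewrite author's own statement) =====
-- stated objective: alternative
-- what changed: B replaces A's left-to-right two-accumulator loop with a divide-and-conquer recursion: the weight of an index range is the weight of its two halves, with single characters as base case.
import Mathlib
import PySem

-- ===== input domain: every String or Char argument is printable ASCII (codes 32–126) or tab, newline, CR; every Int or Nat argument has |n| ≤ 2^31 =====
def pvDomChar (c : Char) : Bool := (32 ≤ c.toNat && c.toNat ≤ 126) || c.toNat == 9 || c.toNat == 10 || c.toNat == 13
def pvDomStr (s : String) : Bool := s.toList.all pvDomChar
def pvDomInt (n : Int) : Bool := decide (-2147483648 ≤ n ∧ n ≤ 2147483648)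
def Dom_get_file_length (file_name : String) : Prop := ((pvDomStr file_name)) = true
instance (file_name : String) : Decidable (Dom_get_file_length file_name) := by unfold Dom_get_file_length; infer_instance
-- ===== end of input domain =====

-- B computes the weight by divide-and-conquer on index ranges instead of A's left-to-right accumulator loop (objective: alternative).


-- ===== PORT A =====
-- literal port of A: loop over the characters keeping the two accumulators (ascii_length, utf8_length)
def get_file_length (file_name : String) : Int :=
  let characters := file_name.toList
  let p := characters.foldl
    (fun (acc : Int × Int) character =>
      if (character.toNat : Int) < 128 then (acc.1 + 1, acc.2) else (acc.1, acc.2 + 2))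
    (0, 0)
  p.1 + p.2

-- ===== PORT B =====
-- literal port of Source B's inner `weight(lo, hi)`: divide-and-conquer on the half-open index range [lo, hi).
-- The first branch tests `hi - lo ≤ 0` where Python tests `hi - lo == 0`: this only makes the recursion
-- total (Python never reaches hi < lo); on every reachable call the two coincide.
def pvWeight (cs : List Char) (lo hi : Int) : Int :=
  if _h0 : hi - lo ≤ 0 then 0
  else if _h1 : hi - lo = 1 then
    match PySem.List.pyGet? cs lo with
    | some c => if (c.toNat : Int) < 128 then 1 else 2
    | none => 0   -- unreachable: Python only indexes with 0 ≤ lo < len(file_name)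
  else
    let mid := PySem.Int.floordiv (lo + hi) 2
    pvWeight cs lo mid + pvWeight cs mid hi
termination_by (hi - lo).toNat
decreasing_by
  all_goals
    have h2 : lo + 2 ≤ hi := by omega
    have hlo := (PySem.Int.le_floordiv_iff_mul_le (a := lo + hi) (b := 2) (q := lo + 1) (by omega)).mpr (by omega)
    have hhi := (PySem.Int.floordiv_lt_iff_lt_mul (a := lo + hi) (b := 2) (q := hi) (by omega)).mpr (by omega)
    omega

def get_file_length_alt (file_name : String) : Int :=
  pvWeight file_name.toList 0 (PySem.Str.len file_name)

-- ===== PRECONDITION & SPEC =====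
def Spec_get_file_length (file_name : String) (out : Int) : Prop := out = get_file_length_alt file_name
instance (file_name : String) (out : Int) : Decidable (Spec_get_file_length file_name out) := by unfold Spec_get_file_length; infer_instance

-- ===== CLAIM (what is proved, stated in full; the proofs are below) =====
def Claim_equal_get_file_length : Prop := ∀ (file_name : String), Dom_get_file_length file_name → Spec_get_file_length file_name (get_file_length file_name)

-- ===== LEMMAS AND PROOFS =====
-- per-character weight (proof abbreviation)
def pvCharWeight (c : Char) : Int := if (c.toNat : Int) < 128 then 1 else 2

-- A's pair-fold, started from (a, b), sums to a + b + the elementwise weight sum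
theorem pvA_fold (l : List Char) (a b : Int) :
    (l.foldl (fun (acc : Int × Int) character =>
        if (character.toNat : Int) < 128 then (acc.1 + 1, acc.2) else (acc.1, acc.2 + 2)) (a, b)).1 +
    (l.foldl (fun (acc : Int × Int) character =>
        if (character.toNat : Int) < 128 then (acc.1 + 1, acc.2) else (acc.1, acc.2 + 2)) (a, b)).2 =
      a + b + (l.map pvCharWeight).sum := by
  induction l generalizing a b with
  | nil => simp
  | cons c t ih =>
      simp only [List.foldl_cons, List.map_cons, List.sum_cons, pvCharWeight]
      by_cases h : (c.toNat : Int) < 128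
      · rw [if_pos h, if_pos h, ih]; ring
      · rw [if_neg h, if_neg h, ih]; ring

-- B's divide-and-conquer over [lo, hi) equals the weight sum of that segment
theorem pvWeight_eq (cs : List Char) (n : Nat) (lo hi : Int) (hn : (hi - lo).toNat = n)
    (h0 : 0 ≤ lo) (h1 : lo ≤ hi) (h2 : hi ≤ (cs.length : Int)) :
    pvWeight cs lo hi = (((cs.drop lo.toNat).take (hi - lo).toNat).map pvCharWeight).sum := by
  induction n using Nat.strong_induction_on generalizing lo hi with
  | _ n ih =>
    rw [pvWeight]
    by_cases hz : hi - lo ≤ 0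
    · have : hi = lo := by omega
      subst this
      simp
    · rw [dif_neg hz]
      by_cases h1' : hi - lo = 1
      · rw [dif_pos h1']
        have hlt : lo < (cs.length : Int) := by omega
        rw [PySem.List.pyGet?_eq_some_getElem (xs := cs) (i := lo) h0 hlt]
        have htake : ((cs.drop lo.toNat).take (hi - lo).toNat) = [cs[lo.toNat]'(by omega)] := by
          have h' : (hi - lo).toNat = 1 := by omega
          rw [h', List.take_one, List.head?_drop, List.getElem?_eq_getElem (by omega)]
          simp
        rw [htake]
        simp [pvCharWeight]
      · rw [dif_neg h1']
        have hmlo := (PySem.Int.le_floordiv_iff_mul_le (a := lo + hi) (b := 2) (q := lo + 1) (by omega)).mpr (by omega)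
        have hmhi := (PySem.Int.floordiv_lt_iff_lt_mul (a := lo + hi) (b := 2) (q := hi) (by omega)).mpr (by omega)
        set mid := PySem.Int.floordiv (lo + hi) 2 with hmid
        show pvWeight cs lo mid + pvWeight cs mid hi = _
        rw [ih (mid - lo).toNat (by omega) lo mid rfl h0 (by omega) (by omega),
            ih (hi - mid).toNat (by omega) mid hi rfl (by omega) (by omega) h2]
        have hsplit : ((cs.drop lo.toNat).take (hi - lo).toNat)
            = ((cs.drop lo.toNat).take (mid - lo).toNat) ++ ((cs.drop mid.toNat).take (hi - mid).toNat) := by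
          have hadd : (hi - lo).toNat = (mid - lo).toNat + (hi - mid).toNat := by omega
          rw [hadd, List.take_add, List.drop_drop]
          have : lo.toNat + (mid - lo).toNat = mid.toNat := by omega
          rw [this]
        rw [hsplit, List.map_append, List.sum_append]

-- whole string: [0, len) covers cs
theorem pv_alt_eq (f : String) :
    get_file_length_alt f = (f.toList.map pvCharWeight).sum := by
  unfold get_file_length_alt
  rw [pvWeight_eq f.toList (PySem.Str.len f - 0).toNat 0 (PySem.Str.len f) rfl le_rfl
      (by simp [PySem.Str.len_eq]) (by simp [PySem.Str.len_eq])]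
  simp only [PySem.Str.len_eq, Int.sub_zero, Int.toNat_natCast, Int.toNat_zero, List.drop_zero]
  rw [List.take_of_length_le (by simp)]

-- ===== VERDICT (by name: the statement is the Claim_ definition above) =====
theorem get_file_length_spec : Claim_equal_get_file_length := by
  intro f _
  unfold Spec_get_file_length get_file_length
  rw [pv_alt_eq]
  simpa using pvA_fold f.toList 0 0
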